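-- pv_equiv track=rewrite | github.com/KotsiosJirisSas/tenpy | NEW_COMMITS/QH_G2MPO.py | set_ordered_states
-- ===== SOURCE A (Python) =====
-- def _mpo_graph_state_order(key):
--     '''
--     Assignes an ordering to each MPO node based on the string
--     '''
--     if isinstance(key, str):
--         if key == 'IdL':  # should be first
--             return (-2, ) #-2 is higher priority ===> gets sorted first
--         if key == 'IdR':  # should be last
--             return (2, ) #-2 is lowest priority ===> gets sorted last
--         # fallback: compare strings
--         return (0, key) #all other strings have same priority 0 and get sorted alphabetically (should be lexicographically?) If it is lexigographically, then there should be some resonable ordering...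
--     else:
--         raise ValueError
--
-- def set_ordered_states(states):
--     '''
--     creates a dictionary for each bond in the system that assigns an index to each node: {'node1':index_1,....}. We always have 'IdL':1,'IdR':-1
--     '''
--     res = []
--     for s in states:
--         d = {}
--         for i, key in enumerate(sorted(s, key=_mpo_graph_state_order)):
--             d[key] = i
--         res.append(d)
--
--     return res
-- ===== SOURCE B (Python) =====
-- def _ordered_bond(s):
--     # partition the keys: 'IdL' occurrences first, 'IdR' occurrences last,
--     # everything else alphabetically in between
--     idl = [k for k in s if k == 'IdL']
--     idr = [k for k in s if k == 'IdR']
--     others = sorted(k for k in s if k != 'IdL' and k != 'IdR')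
--     return idl + others + idr
--
-- def set_ordered_states(states):
--     return [{key: i for i, key in enumerate(_ordered_bond(s))} for s in states]
-- ===== Notes on version B (the rewrite author's own statement) =====
-- stated objective: simpler
-- what changed: Replaces the tuple-key sort with an explicit partition (IdL occurrences / plain-sorted other keys / IdR occurrences) concatenated and enumerated into the dict, as list/dict comprehensions instead of accumulator loops.
import Mathlib
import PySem

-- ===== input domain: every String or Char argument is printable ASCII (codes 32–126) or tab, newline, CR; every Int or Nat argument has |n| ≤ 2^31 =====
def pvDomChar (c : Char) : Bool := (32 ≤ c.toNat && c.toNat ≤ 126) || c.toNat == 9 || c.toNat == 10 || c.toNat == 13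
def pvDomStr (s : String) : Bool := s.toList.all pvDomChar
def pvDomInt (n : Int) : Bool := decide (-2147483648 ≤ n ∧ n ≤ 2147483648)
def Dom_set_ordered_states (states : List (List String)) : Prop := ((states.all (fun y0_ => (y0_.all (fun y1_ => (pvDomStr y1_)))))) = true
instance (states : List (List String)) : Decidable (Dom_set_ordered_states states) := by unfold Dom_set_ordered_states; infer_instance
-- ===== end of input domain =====

-- B replaces the tuple-key sort with a partition (IdL's / plain-sorted others / IdR's) built by comprehensions: simpler.

-- ===== PORT A =====
-- A's key returns the 1-tuples (-2,)/(2,) for 'IdL'/'IdR' and (0, key) otherwise; ported as pairs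
-- padded with "" — exact, since second components are only ever compared between keys of the same class.
-- (The 'else: raise ValueError' branch is unreachable here: every element is a String by type.)
def mpo_graph_state_order (key : String) : Int × String :=
  if key == "IdL" then (-2, "")
  else if key == "IdR" then (2, "")
  else (0, key)

def set_ordered_states (states : List (List String)) : List (List (String × Int)) :=
  states.foldl
    (fun res s =>
      let d :=
        (PySem.List.enumerate
            (PySem.List.sorted2 s
              (fun k => (mpo_graph_state_order k).1)
              (fun k => (mpo_graph_state_order k).2) false) 0).foldl
          (fun d p => d.insert p.2 p.1) PySem.Dict.empty
      res ++ [d.items])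
    []

-- ===== PORT B =====
def ordered_bond (s : List String) : List String :=
  let idl := s.filter (fun k => k == "IdL")
  let idr := s.filter (fun k => k == "IdR")
  let others := PySem.List.sorted (s.filter (fun k => k != "IdL" && k != "IdR")) (fun x => x) false
  idl ++ others ++ idr

def set_ordered_states_alt (states : List (List String)) : List (List (String × Int)) :=
  states.map (fun s =>
    ((PySem.List.enumerate (ordered_bond s) 0).foldl
        (fun d p => d.insert p.2 p.1) PySem.Dict.empty).items)

-- ===== PRECONDITION & SPEC =====
def Spec_set_ordered_states (states : List (List String)) (out : List (List (String × Int))) : Prop := out = set_ordered_states_alt states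
instance (states : List (List String)) (out : List (List (String × Int))) : Decidable (Spec_set_ordered_states states out) := by unfold Spec_set_ordered_states; infer_instance

-- ===== CLAIM (what is proved, stated in full; the proofs are below) =====
def Claim_equal_set_ordered_states : Prop := ∀ (states : List (List String)), Dom_set_ordered_states states → Spec_set_ordered_states states (set_ordered_states states)

-- ===== LEMMAS AND PROOFS =====

-- the combined sort key of A, as a single lexicographically ordered value
def keyL (k : String) : Int ×ₗ String := toLex (mpo_graph_state_order k)

theorem keyL_inj : Function.Injective keyL := by
  intro a b h
  have h' : mpo_graph_state_order a = mpo_graph_state_order b := toLex.injective h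
  unfold mpo_graph_state_order at h'
  by_cases ha : a == "IdL" <;> by_cases hb : b == "IdL" <;>
    by_cases ha' : a == "IdR" <;> by_cases hb' : b == "IdR" <;>
    simp_all

-- A's sorted2 with the two projections is the single-key sort by keyL
theorem sorted2_eq_sorted_keyL (s : List String) :
    PySem.List.sorted2 s (fun k => (mpo_graph_state_order k).1)
      (fun k => (mpo_graph_state_order k).2) false
      = PySem.List.sorted s keyL false := by
  rw [PySem.List.sorted_eq_foldl_insertBy]
  have hfun : (fun (a b : String) =>
      decide ((mpo_graph_state_order a).1 < (mpo_graph_state_order b).1)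
        || (!decide ((mpo_graph_state_order b).1 < (mpo_graph_state_order a).1)
            && decide ((mpo_graph_state_order a).2 < (mpo_graph_state_order b).2)))
      = (fun a b => decide (keyL a < keyL b)) := by
    funext a b
    have hlt : keyL a < keyL b ↔
        (mpo_graph_state_order a).1 < (mpo_graph_state_order b).1 ∨
        ((mpo_graph_state_order a).1 = (mpo_graph_state_order b).1 ∧
          (mpo_graph_state_order a).2 < (mpo_graph_state_order b).2) := by
      unfold keyL
      rw [Prod.Lex.lt_iff]
      exact Iff.rfl
    by_cases h1 : (mpo_graph_state_order a).1 < (mpo_graph_state_order b).1 <;>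
      by_cases h2 : (mpo_graph_state_order b).1 < (mpo_graph_state_order a).1 <;>
      by_cases h3 : (mpo_graph_state_order a).2 < (mpo_graph_state_order b).2 <;>
      simp [hlt, h1, h2, h3] <;> omega
  show List.foldl (fun acc x => PySem.List.insertBy (fun (a b : String) =>
      decide ((mpo_graph_state_order a).1 < (mpo_graph_state_order b).1)
        || (!decide ((mpo_graph_state_order b).1 < (mpo_graph_state_order a).1)
            && decide ((mpo_graph_state_order a).2 < (mpo_graph_state_order b).2))) x acc) [] s
      = List.foldl (fun acc x => PySem.List.insertBy (fun a b => decide (keyL a < keyL b)) x acc) [] s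
  rw [hfun]

theorem keyL_of_other {k : String} (h1 : ¬ k = "IdL") (h2 : ¬ k = "IdR") :
    keyL k = toLex ((0 : Int), k) := by
  simp [keyL, mpo_graph_state_order, h1, h2]

theorem pairwise_keyL_const (l : List String) (c : String) (hc : ∀ x ∈ l, x = c) :
    l.Pairwise (fun a b => keyL a ≤ keyL b) := by
  refine List.pairwise_of_forall_mem_list ?_
  intro a ha b hb
  rw [hc a ha, hc b hb]

-- the partition list is keyL-sorted
theorem pairwise_ordered_bond (s : List String) :
    (ordered_bond s).Pairwise (fun a b => keyL a ≤ keyL b) := by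
  have hidl : ∀ x ∈ s.filter (fun k => k == "IdL"), x = "IdL" := by
    intro x hx; simpa using (List.of_mem_filter hx)
  have hidr : ∀ x ∈ s.filter (fun k => k == "IdR"), x = "IdR" := by
    intro x hx; simpa using (List.of_mem_filter hx)
  have hoth : ∀ x ∈ PySem.List.sorted (s.filter (fun k => k != "IdL" && k != "IdR")) (fun x => x) false,
      ¬ x = "IdL" ∧ ¬ x = "IdR" := by
    intro x hx
    rw [PySem.List.mem_sorted] at hx
    simpa using (List.of_mem_filter hx)
  show ((s.filter (fun k => k == "IdL")
      ++ PySem.List.sorted (s.filter (fun k => k != "IdL" && k != "IdR")) (fun x => x) false)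
      ++ s.filter (fun k => k == "IdR")).Pairwise (fun a b => keyL a ≤ keyL b)
  rw [List.pairwise_append, List.pairwise_append]
  refine ⟨⟨pairwise_keyL_const _ _ hidl, ?_, ?_⟩, pairwise_keyL_const _ _ hidr, ?_⟩
  · -- others: the plain string sort is keyL-monotone on non-Id keys
    refine (PySem.List.sorted_pairwise (s.filter (fun k => k != "IdL" && k != "IdR"))
      (fun x => x) ).imp_of_mem ?_
    intro a b ha hb hle
    rw [keyL_of_other (hoth a ha).1 (hoth a ha).2, keyL_of_other (hoth b hb).1 (hoth b hb).2,
      Prod.Lex.le_iff]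
    exact Or.inr ⟨rfl, hle⟩
  · intro a ha b hb
    rw [hidl a ha, show keyL "IdL" = toLex ((-2 : Int), "") from rfl]
    rw [keyL_of_other (hoth b hb).1 (hoth b hb).2, Prod.Lex.le_iff]
    exact Or.inl (by norm_num)
  · intro a ha b hb
    rw [hidr b hb, show keyL "IdR" = toLex ((2 : Int), "") from rfl]
    rcases List.mem_append.mp ha with ha | ha
    · rw [hidl a ha, show keyL "IdL" = toLex ((-2 : Int), "") from rfl, Prod.Lex.le_iff]
      exact Or.inl (by norm_num)
    · rw [keyL_of_other (hoth a ha).1 (hoth a ha).2, Prod.Lex.le_iff]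
      exact Or.inl (by norm_num)

-- the partition list is a permutation of s
theorem perm_ordered_bond (s : List String) : (ordered_bond s).Perm s := by
  have e1 : (s.filter (fun k => !(k == "IdL"))).filter (fun k => k == "IdR")
      = s.filter (fun k => k == "IdR") := by
    rw [List.filter_filter]
    refine List.filter_congr ?_
    intro x hx; by_cases h : x = "IdR" <;> simp [h]
  have e2 : (s.filter (fun k => !(k == "IdL"))).filter (fun k => !(k == "IdR"))
      = s.filter (fun k => k != "IdL" && k != "IdR") := by
    rw [List.filter_filter]
    refine List.filter_congr ?_
    intro x hx
    cases h : x == "IdL" <;> cases h' : x == "IdR" <;> simp [h, h', bne]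
  show ((s.filter (fun k => k == "IdL")
      ++ PySem.List.sorted (s.filter (fun k => k != "IdL" && k != "IdR")) (fun x => x) false)
      ++ s.filter (fun k => k == "IdR")).Perm s
  rw [List.append_assoc]
  refine List.Perm.trans ?_ (List.filter_append_perm (fun k => k == "IdL") s)
  refine List.Perm.append_left _ ?_
  refine List.Perm.trans (List.perm_append_comm) ?_
  refine List.Perm.trans (List.Perm.append_left _ (PySem.List.sorted_perm _ _ _)) ?_
  rw [← e1, ← e2]
  exact List.filter_append_perm _ _

theorem sorted_eq_ordered_bond (s : List String) :
    PySem.List.sorted s keyL false = ordered_bond s := by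
  refine PySem.List.eq_of_perm_of_pairwise_le_of_injective keyL keyL_inj ?_ ?_ ?_
  · exact (PySem.List.sorted_perm _ _ _).trans (perm_ordered_bond s).symm
  · exact PySem.List.sorted_pairwise _ _
  · exact pairwise_ordered_bond s

-- ===== VERDICT (by name: the statement is the Claim_ definition above) =====
theorem set_ordered_states_spec : Claim_equal_set_ordered_states := by
  intro states _
  unfold Spec_set_ordered_states set_ordered_states set_ordered_states_alt
  show states.foldl (fun res s => res ++
      [((PySem.List.enumerate
          (PySem.List.sorted2 s (fun k => (mpo_graph_state_order k).1)
            (fun k => (mpo_graph_state_order k).2) false) 0).foldl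
        (fun d p => d.insert p.2 p.1) PySem.Dict.empty).items]) [] = _
  rw [PySem.List.foldl_append_singleton_eq_map]
  simp only [List.nil_append]
  refine List.map_congr_left ?_
  intro s _
  rw [sorted2_eq_sorted_keyL, sorted_eq_ordered_bond]
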